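-- pv_equiv track=rewrite | github.com/qizongliang/csci133 | test9.py | evaluate
-- ===== SOURCE A (Python) =====
-- def faceValueOf(card):
--     return card.split()[0]
--
-- def evaluate(hand):
--     score = 0
--     countMultiple = {}
--     for card in hand:
--         if faceValueOf(card) in countMultiple:
--             countMultiple[faceValueOf(card)]+=1
--         else:
--             countMultiple[faceValueOf(card)]=1
--
--     for value in countMultiple:
--         if(countMultiple[value] == 4):
--             score += 100
--         elif(countMultiple[value] == 3):
--             score +=10
--         elif(countMultiple[value] == 2):
--             score+=1
--     return score
-- ===== SOURCE B (Python) =====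
-- def faceValueOf(card):
--     return card.split()[0]
--
-- _RUN_SCORE = {2: 1, 3: 10, 4: 100}
--
-- def evaluate(hand):
--     total = 0
--     run = 0
--     prev = None
--     for card in sorted(hand, key=faceValueOf):
--         face = faceValueOf(card)
--         if face == prev:
--             run += 1
--         else:
--             total += _RUN_SCORE.get(run, 0)
--             run = 1
--             prev = face
--     total += _RUN_SCORE.get(run, 0)
--     return total
-- ===== Notes on version B (the rewrite author's own statement) =====
-- stated objective: alternative
-- what changed: B replaces A's per-face dict counting plus a second pass over the dict by sorting the hand on faceValueOf and doing one run-length scan over the sorted cards, mapping each run length to its score via a small lookup table.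
import Mathlib
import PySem

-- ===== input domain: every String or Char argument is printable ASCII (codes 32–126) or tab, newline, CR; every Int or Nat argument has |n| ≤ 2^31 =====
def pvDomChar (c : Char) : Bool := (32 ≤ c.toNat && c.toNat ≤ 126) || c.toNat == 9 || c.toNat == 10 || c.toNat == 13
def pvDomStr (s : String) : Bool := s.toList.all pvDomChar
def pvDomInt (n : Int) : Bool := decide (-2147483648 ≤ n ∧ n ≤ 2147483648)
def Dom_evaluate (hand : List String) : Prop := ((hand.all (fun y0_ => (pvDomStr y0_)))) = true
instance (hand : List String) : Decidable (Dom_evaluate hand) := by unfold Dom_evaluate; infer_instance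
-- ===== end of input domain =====

-- B replaces the dict-counting double pass by sort-on-face + one run-length scan; objective: alternative (not faster).

-- ===== PORT A =====
-- card.split()[0]; the [0] raises IndexError on a whitespace-only card — such inputs are excluded by Pre_evaluate
def faceValueOf (card : String) : String :=
  (PySem.List.pyGet? (PySem.Str.split₀ card) 0).getD ""

def evaluate (hand : List String) : Int :=
  let countMultiple : PySem.Dict String Int :=
    hand.foldl (fun d card =>
      if d.contains (faceValueOf card) then
        d.insert (faceValueOf card) (d.getD (faceValueOf card) 0 + 1)
      else
        d.insert (faceValueOf card) 1) PySem.Dict.empty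
  countMultiple.keys.foldl (fun score value =>
    if countMultiple.getD value 0 == 4 then score + 100
    else if countMultiple.getD value 0 == 3 then score + 10
    else if countMultiple.getD value 0 == 2 then score + 1
    else score) 0

-- ===== PORT B =====
-- _RUN_SCORE.get(run, 0)
def runScore (n : Int) : Int :=
  (PySem.Dict.ofList [((2 : Int), (1 : Int)), (3, 10), (4, 100)]).getD n 0

def evaluate_alt (hand : List String) : Int :=
  let st :=
    (PySem.List.sorted hand (fun c => faceValueOf c) false).foldl
      (fun (st : Int × Int × Option String) card =>
        let face := faceValueOf card
        if some face == st.2.2 then (st.1, st.2.1 + 1, st.2.2)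
        else (st.1 + runScore st.2.1, 1, some face))
      ((0 : Int), (0 : Int), (none : Option String))
  st.1 + runScore st.2.1

-- ===== PRECONDITION & SPEC =====
-- Pre_ excludes exactly the hands containing a card with no non-whitespace character:
-- there card.split()[0] raises IndexError in Python (both A and B raise).
def Pre_evaluate (hand : List String) : Prop :=
  ∀ card ∈ hand, PySem.Str.split₀ card ≠ []
instance (hand : List String) : Decidable (Pre_evaluate hand) := by unfold Pre_evaluate; infer_instance

def pvWitness_evaluate : List String := ["A spades", "A hearts", "A clubs", "K d"]

def Spec_evaluate (hand : List String) (out : Int) : Prop := out = evaluate_alt hand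
instance (hand : List String) (out : Int) : Decidable (Spec_evaluate hand out) := by unfold Spec_evaluate; infer_instance

-- ===== CLAIM (what is proved, stated in full; the proofs are below) =====
def Claim_equal_evaluate : Prop := ∀ (hand : List String), Dom_evaluate hand → Pre_evaluate hand → Spec_evaluate hand (evaluate hand)

-- ===== LEMMAS AND PROOFS =====

-- the score of one face value with count n (A's if/elif chain)
def scoreOf (n : Int) : Int :=
  if n = 4 then 100 else if n = 3 then 10 else if n = 2 then 1 else 0

theorem runScore_eq_scoreOf (n : Int) : runScore n = scoreOf n := by
  unfold runScore scoreOf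
  have hitems : (PySem.Dict.ofList [((2 : Int), (1 : Int)), (3, 10), (4, 100)]).items
      = [(2, 1), (3, 10), (4, 100)] := by decide
  simp only [PySem.Dict.getD, PySem.Dict.get?, hitems]
  split_ifs with h4 h3 h2
  · subst h4; decide
  · subst h3; decide
  · subst h2; decide
  · have e2 : ((2 : Int) == n) = false := by simpa using (by omega : (2 : Int) ≠ n)
    have e3 : ((3 : Int) == n) = false := by simpa using (by omega : (3 : Int) ≠ n)
    have e4 : ((4 : Int) == n) = false := by simpa using (by omega : (4 : Int) ≠ n)
    simp [List.find?, e2, e3, e4]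

-- sum of scoreOf(count) over the distinct elements of l
def SumScore (l : List String) : Int :=
  ((PySem.Set.ofList l).map (fun v => scoreOf (l.count v : Int))).sum

-- recursive form of SumScore: score the head's face, recurse on the rest
def S : List String → Int
  | [] => 0
  | y :: t => scoreOf (1 + (t.count y : Int)) + S (t.filter (fun z => !(z == y)))
  termination_by l => l.length
  decreasing_by
    simp only [List.length_unattach, List.length_cons]
    exact Nat.lt_succ_of_le (le_trans (List.length_filter_le _ _) (by simp))

theorem sumScore_perm {l l' : List String} (h : l.Perm l') : SumScore l = SumScore l' := by
  unfold SumScore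
  have hperm : (PySem.Set.ofList l).Perm (PySem.Set.ofList l') := by
    refine (List.perm_ext_iff_of_nodup (PySem.Set.nodup_ofList _) (PySem.Set.nodup_ofList _)).2 ?_
    intro a
    simp only [PySem.Set.mem_ofList]
    exact ⟨fun hm => h.mem_iff.1 hm, fun hm => h.mem_iff.2 hm⟩
  have hmap : ((PySem.Set.ofList l).map (fun v => scoreOf (l.count v : Int))).Perm
      ((PySem.Set.ofList l').map (fun v => scoreOf (l'.count v : Int))) := by
    have : (fun v => scoreOf ((l.count v : Int))) = (fun v => scoreOf ((l'.count v : Int))) := by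
      funext v; rw [h.count_eq]
    rw [this]
    exact hperm.map _
  exact hmap.sum_eq

theorem sumScore_eq_S (l : List String) : SumScore l = S l := by
  suffices h : ∀ (n : Nat) (l : List String), l.length ≤ n → SumScore l = S l from
    h l.length l le_rfl
  intro n
  induction n with
  | zero =>
    intro l hl
    have : l = [] := List.eq_nil_of_length_eq_zero (Nat.le_zero.1 hl)
    subst this
    simp [SumScore, S, PySem.Set.ofList]
  | succ n ihn =>
    intro l hl
    cases l with
    | nil => simp [SumScore, S, PySem.Set.ofList]
    | cons y t =>
      rw [S]
      have hperm : (PySem.Set.ofList (y :: t)).Perm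
          (y :: PySem.Set.ofList (t.filter (fun z => !(z == y)))) := by
        refine (List.perm_ext_iff_of_nodup (PySem.Set.nodup_ofList _) ?_).2 ?_
        · refine List.Nodup.cons ?_ (PySem.Set.nodup_ofList _)
          intro hy
          have := (PySem.Set.mem_ofList _ _).1 hy
          simp at this
        · intro a
          simp only [PySem.Set.mem_ofList, List.mem_cons, List.mem_filter, Bool.not_eq_true',
            beq_eq_false_iff_ne, ne_eq]
          by_cases ha : a = y <;> simp [ha]
      unfold SumScore
      rw [(hperm.map (fun v => scoreOf ((y :: t).count v : Int))).sum_eq]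
      simp only [List.map_cons, List.sum_cons]
      have hcongr : (PySem.Set.ofList (t.filter (fun z => !(z == y)))).map
            (fun v => scoreOf (((y :: t).count v : Int)))
          = (PySem.Set.ofList (t.filter (fun z => !(z == y)))).map
            (fun v => scoreOf (((t.filter (fun z => !(z == y))).count v : Int))) := by
        refine List.map_congr_left ?_
        intro v hv
        have hvf := (PySem.Set.mem_ofList _ _).1 hv
        have hvne : v ≠ y := by
          have := (List.mem_filter.1 hvf).2
          simpa using this
        have h1 : (y :: t).count v = t.count v := by
          rw [List.count_cons]
          simp [Ne.symm hvne]
        have h2 : (t.filter (fun z => !(z == y))).count v = t.count v :=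
          List.count_filter (by simpa using hvne)
        rw [h1, ← h2]
      rw [hcongr]
      have hrec : SumScore (t.filter (fun z => !(z == y))) = S (t.filter (fun z => !(z == y))) := by
        refine ihn _ (le_trans (List.length_filter_le _ _) ?_)
        simpa using Nat.le_of_succ_le_succ hl
      unfold SumScore at hrec
      rw [hrec]
      have hy : ((y :: t).count y : Int) = 1 + (t.count y : Int) := by
        simp
        omega
      rw [hy]

-- the run-length scan over a list of faces
def step (st : Int × Int × Option String) (f : String) : Int × Int × Option String :=
  if some f == st.2.2 then (st.1, st.2.1 + 1, st.2.2)
  else (st.1 + runScore st.2.1, 1, some f)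

-- main invariant of the scan on a sorted face list
theorem scan_invariant (fs : List String) (hs : fs.Pairwise (· ≤ ·)) :
    ∀ (x : String), (∀ y ∈ fs, x ≤ y) → ∀ (t r : Int),
      (fs.foldl step (t, r, some x)).1 + runScore (fs.foldl step (t, r, some x)).2.1
        = t + scoreOf (r + (fs.count x : Int)) + S (fs.filter (fun z => !(z == x))) := by
  induction fs with
  | nil =>
    intro x _ t r
    simp [S, runScore_eq_scoreOf]
  | cons y rest ih =>
    intro x hle t r
    have hyrest : ∀ z ∈ rest, y ≤ z := fun z hz => (List.pairwise_cons.1 hs).1 z hz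
    have hrest : rest.Pairwise (· ≤ ·) := (List.pairwise_cons.1 hs).2
    by_cases hxy : y = x
    · subst hxy
      have hstep : step (t, r, some y) y = (t, r + 1, some y) := by
        simp [step]
      rw [List.foldl_cons, hstep]
      rw [ih hrest y hyrest t (r + 1)]
      have hc : ((y :: rest).count y : Int) = 1 + (rest.count y : Int) := by
        simp; omega
      rw [List.filter_cons]
      simp only [beq_self_eq_true, Bool.not_true, if_neg (by simp : ¬ (false = true))]
      rw [hc]
      ring_nf
    · have hxlt : x < y := lt_of_le_of_ne (hle y (List.mem_cons_self)) (Ne.symm hxy)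
      have hxnotin : x ∉ rest := by
        intro hm
        exact absurd (hyrest x hm) (not_le.2 hxlt)
      have hstep : step (t, r, some x) y = (t + runScore r, 1, some y) := by
        simp [step, hxy]
      rw [List.foldl_cons, hstep]
      rw [ih hrest y hyrest (t + runScore r) 1]
      have hcx : (y :: rest).count x = 0 := by
        simp [List.count_eq_zero, hxnotin, Ne.symm hxy]
      have hfx : (y :: rest).filter (fun z => !(z == x)) = y :: rest := by
        rw [List.filter_eq_self]
        intro z hz
        rcases List.mem_cons.1 hz with h | h
        · subst h; simpa using hxy
        · have : z ≠ x := fun he => hxnotin (he ▸ h)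
          simpa using this
      have hcy : (rest.count y : Int) + 1 = 1 + (rest.count y : Int) := by ring
      rw [hcx, hfx]
      simp only [runScore_eq_scoreOf]
      rw [S]
      push_cast
      ring

-- A's value is SumScore of the face multiset
theorem evaluate_eq_sumScore (hand : List String) :
    evaluate hand = SumScore (hand.map faceValueOf) := by
  unfold evaluate
  set F := hand.map faceValueOf with hF
  have key : ∀ (l : List String) (d : PySem.Dict String Int),
      l.foldl (fun d card =>
        if d.contains (faceValueOf card) then
          d.insert (faceValueOf card) (d.getD (faceValueOf card) 0 + 1)
        else
          d.insert (faceValueOf card) 1) d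
      = (l.map faceValueOf).foldl (fun d x => d.insert x (d.getD x 0 + 1)) d := by
    intro l
    induction l with
    | nil => intro d; rfl
    | cons c rest ih =>
      intro d
      simp only [List.foldl_cons, List.map_cons]
      rw [ih]
      congr 1
      by_cases hc : d.contains (faceValueOf c)
      · simp [hc]
      · have hnone : d.get? (faceValueOf c) = none := by
          rw [PySem.Dict.get?_eq_none_iff_contains]
          simpa using hc
        have h0 : d.getD (faceValueOf c) 0 = 0 := by
          simp [PySem.Dict.getD, hnone]
        simp [hc, h0]
  have hfold : hand.foldl (fun d card =>
      if d.contains (faceValueOf card) then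
        d.insert (faceValueOf card) (d.getD (faceValueOf card) 0 + 1)
      else
        d.insert (faceValueOf card) 1) PySem.Dict.empty
      = PySem.Dict.counter F := by
    rw [key hand PySem.Dict.empty, ← hF]
    exact PySem.Dict.foldl_insert_getD_add_one_eq_counter F
  rw [hfold]
  have hkeys : (PySem.Dict.counter F).keys = PySem.Set.ofList F := PySem.Dict.keys_counter F
  have hbody : (PySem.Dict.counter F).keys.foldl (fun score value =>
      if (PySem.Dict.counter F).getD value 0 == 4 then score + 100
      else if (PySem.Dict.counter F).getD value 0 == 3 then score + 10
      else if (PySem.Dict.counter F).getD value 0 == 2 then score + 1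
      else score) 0
      = (PySem.Dict.counter F).keys.foldl
          (fun score value => score + scoreOf (F.count value : Int)) 0 := by
    apply PySem.List.foldl_congr_mem
    intro score value _
    rw [PySem.Dict.getD_counter]
    unfold scoreOf
    split_ifs <;> simp_all
  rw [hbody, hkeys, PySem.List.foldl_add]
  unfold SumScore
  simp

-- B's value is S of the sorted face multiset
theorem evaluate_alt_eq_S (hand : List String) :
    evaluate_alt hand = S ((PySem.List.sorted hand (fun c => faceValueOf c) false).map faceValueOf) := by
  unfold evaluate_alt
  set fs := (PySem.List.sorted hand (fun c => faceValueOf c) false).map faceValueOf with hfs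
  have hpair : fs.Pairwise (· ≤ ·) := by
    rw [hfs]
    exact PySem.List.sorted_map_key_pairwise hand (fun c => faceValueOf c)
  have hfold : (PySem.List.sorted hand (fun c => faceValueOf c) false).foldl
      (fun (st : Int × Int × Option String) card =>
        let face := faceValueOf card
        if some face == st.2.2 then (st.1, st.2.1 + 1, st.2.2)
        else (st.1 + runScore st.2.1, 1, some face))
      ((0 : Int), (0 : Int), (none : Option String))
      = fs.foldl step ((0 : Int), (0 : Int), (none : Option String)) := by
    rw [hfs, List.foldl_map]
    rfl
  simp only [hfold]
  cases hc : fs with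
  | nil => simp [S, runScore_eq_scoreOf, scoreOf]
  | cons x rest =>
    have hstep : step ((0 : Int), (0 : Int), (none : Option String)) x
        = (0 + runScore 0, 1, some x) := by
      simp [step]
    rw [List.foldl_cons, hstep]
    have hpair' : rest.Pairwise (· ≤ ·) := (List.pairwise_cons.1 (hc ▸ hpair)).2
    have hle : ∀ y ∈ rest, x ≤ y := fun y hy => (List.pairwise_cons.1 (hc ▸ hpair)).1 y hy
    rw [scan_invariant rest hpair' x hle (0 + runScore 0) 1]
    rw [runScore_eq_scoreOf, S]
    simp [scoreOf]

-- ===== VERDICT (by name: the statement is the Claim_ definition above) =====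
theorem evaluate_spec : Claim_equal_evaluate := by
  intro hand _ _
  unfold Spec_evaluate
  rw [evaluate_eq_sumScore, evaluate_alt_eq_S]
  rw [← sumScore_eq_S]
  exact sumScore_perm ((PySem.List.sorted_perm hand (fun c => faceValueOf c) false).map faceValueOf).symm
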